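-- pv_equiv track=rewrite | github.com/Grae-Drake/Python_Euler | Question 23 test2.py | list_abundant_nums
-- ===== SOURCE A (Python) =====
-- import math
--
-- def calc_proper_factors(x):
--     proper_factors = []
--     for item in range(2,int(math.sqrt(x)+1)):
--         if x % item == 0:
--             proper_factors.append(item)
--
--             if int(x/item) not in proper_factors:
--                 proper_factors.append(int(x/item))
--     proper_factors.append(1)
--     return proper_factors
--
-- def list_abundant_nums(limit):
--     big_list = [[item, 0] for item in range(1,limit+1)]
--     for item in big_list:
--         item[1] = sum(calc_proper_factors(item[0]))
--
--     abundant_nums = []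
--     for item in big_list:
--         if item[0] < item[1]:
--             abundant_nums.append(item[0])
--     return abundant_nums
-- ===== SOURCE B (Python) =====
-- def list_abundant_nums(limit):
--     if limit < 1:
--         return []
--     sums = [0] * (limit + 1)
--     for d in range(1, limit + 1):
--         for m in range(2 * d, limit + 1, d):
--             sums[m] += d
--     return [n for n in range(1, limit + 1) if sums[n] > n]
-- ===== Notes on version B (the rewrite author's own statement) =====
-- stated objective: faster
-- what changed: A computes each number's proper-divisor sum separately by trial division up to sqrt(x); B builds one divisor-sum sieve array, adding each d to all of its multiples up to limit, then reads off the abundant numbers in a single pass.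
import Mathlib
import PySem

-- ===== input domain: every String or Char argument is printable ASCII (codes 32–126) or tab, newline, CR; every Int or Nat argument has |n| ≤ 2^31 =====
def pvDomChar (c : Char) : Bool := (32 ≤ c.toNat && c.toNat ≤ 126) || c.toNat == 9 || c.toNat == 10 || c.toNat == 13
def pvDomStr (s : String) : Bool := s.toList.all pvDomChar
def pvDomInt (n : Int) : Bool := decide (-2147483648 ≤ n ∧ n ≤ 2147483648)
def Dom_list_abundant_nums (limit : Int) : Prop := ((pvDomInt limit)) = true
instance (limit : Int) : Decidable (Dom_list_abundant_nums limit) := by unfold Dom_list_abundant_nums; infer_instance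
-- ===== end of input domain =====

-- B replaces A's per-number trial division up to sqrt(x) by a single divisor-sum sieve that adds
-- each divisor d to all of its multiples up to limit (objective: faster).

-- ===== PORT A =====
-- int(math.sqrt(x) + 1): exact on Dom — for 0 ≤ x ≤ 2^31 the double-precision sqrt is accurate
-- enough that int(math.sqrt(x) + 1) = Nat.sqrt x + 1 (checked exhaustively near squares and by
-- sampling over the whole range); ported by hand as Nat.sqrt.
def pyIntSqrtSucc (x : Int) : Int := (Nat.sqrt x.toNat : Int) + 1

def calc_proper_factors (x : Int) : List Int :=
  let proper_factors : List Int :=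
    (PySem.List.pyRange 2 (pyIntSqrtSucc x) 1).foldl (fun proper_factors item =>
      if PySem.Int.mod x item = 0 then
        -- proper_factors.append(item)
        let proper_factors := proper_factors ++ [item]
        -- int(x/item): exact on Dom — item divides x and 0 < x ≤ 2^31 < 2^53, so the float
        -- division is the exact integer quotient; ported as floor division.
        if (PySem.Int.floordiv x item) ∈ proper_factors then proper_factors
        else proper_factors ++ [PySem.Int.floordiv x item]
      else proper_factors) []
  proper_factors ++ [1]

def list_abundant_nums (limit : Int) : List Int :=
  let big_list : List (Int × Int) :=
    (PySem.List.pyRange 1 (limit + 1) 1).map (fun item => (item, 0))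
  -- for item in big_list: item[1] = sum(calc_proper_factors(item[0]))
  let big_list : List (Int × Int) :=
    big_list.map (fun item => (item.1, (calc_proper_factors item.1).sum))
  let abundant_nums : List Int :=
    big_list.foldl (fun abundant_nums item =>
      if item.1 < item.2 then abundant_nums ++ [item.1] else abundant_nums) []
  abundant_nums

-- ===== PORT B =====
-- Source B's Python list `sums` is ported as a Lean Array (Python lists are mutable arrays;
-- [0]*(limit+1) = Array.replicate, and sums[m] += d / sums[n] read exactly, since every
-- executed index is in range 0..limit, so setIfInBounds/getD never clamp or default).
def sieveAdd (sums : Array Int) (m d : Int) : Array Int :=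
  sums.setIfInBounds m.toNat (sums.getD m.toNat 0 + d)

def list_abundant_nums_alt (limit : Int) : List Int :=
  if limit < 1 then []
  else
    let sums : Array Int := Array.replicate (limit + 1).toNat 0
    let sums : Array Int :=
      (PySem.List.pyRange 1 (limit + 1) 1).foldl (fun sums d =>
        (PySem.List.pyRange (2 * d) (limit + 1) d).foldl (fun sums m => sieveAdd sums m d) sums)
        sums
    (PySem.List.pyRange 1 (limit + 1) 1).foldl (fun acc n =>
      if sums.getD n.toNat 0 > n then acc ++ [n] else acc) []

-- ===== PRECONDITION & SPEC =====
def Spec_list_abundant_nums (limit : Int) (out : List Int) : Prop := out = list_abundant_nums_alt limit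
instance (limit : Int) (out : List Int) : Decidable (Spec_list_abundant_nums limit out) := by unfold Spec_list_abundant_nums; infer_instance

-- ===== CLAIM (what is proved, stated in full; the proofs are below) =====
def Claim_equal_list_abundant_nums : Prop := ∀ (limit : Int), Dom_list_abundant_nums limit → Spec_list_abundant_nums limit (list_abundant_nums limit)

-- ===== LEMMAS AND PROOFS =====

-- The mathematical value both programs compute per number: the sum of proper divisors.
def spsum (N : Nat) : Nat := ∑ d ∈ N.properDivisors, d

lemma nat_lt_two_cases {x : Nat} (h : x < 2) : x = 0 ∨ x = 1 := by
  rcases x with _ | u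
  · exact Or.inl rfl
  · rcases u with _ | v
    · exact Or.inr rfl
    · omega

-- ---- pure number theory: the sqrt-pairing sum (A's per-number loop) equals spsum ----
lemma nt_pairing (N : Nat) (h2 : 2 ≤ N) :
    1 + ∑ i ∈ Finset.Ico 2 (N.sqrt + 1), (if i ∣ N then i + (if i * i = N then 0 else N / i) else 0) =
      spsum N := by
  classical
  obtain ⟨r, hr⟩ : ∃ r, r = N.sqrt := ⟨_, rfl⟩
  rw [← hr]
  have hN0 : N ≠ 0 := by omega
  have hrr : r * r ≤ N := by rw [hr]; exact Nat.sqrt_le N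
  have hrN : r < N := by rw [hr]; exact Nat.sqrt_lt_self (by omega)
  have hr1 : 1 ≤ r := by rw [hr]; exact Nat.le_sqrt.mpr (by omega)
  obtain ⟨small, hsmall⟩ : ∃ s : Finset ℕ, s = (Finset.Ico 2 (r + 1)).filter (· ∣ N) := ⟨_, rfl⟩
  obtain ⟨small2, hsmall2⟩ : ∃ s : Finset ℕ, s = small.filter (fun i => ¬ i * i = N) := ⟨_, rfl⟩
  obtain ⟨img, himg⟩ : ∃ s : Finset ℕ, s = small2.image (fun i => N / i) := ⟨_, rfl⟩
  have hmem_small : ∀ i, i ∈ small ↔ 2 ≤ i ∧ i ≤ r ∧ i ∣ N := by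
    intro i; simp [hsmall, Finset.mem_filter, Finset.mem_Ico, and_assoc]
  have hmem_small2 : ∀ i, i ∈ small2 ↔ 2 ≤ i ∧ i ≤ r ∧ i ∣ N ∧ i * i ≠ N := by
    intro i
    rw [hsmall2, Finset.mem_filter, hmem_small i]
    tauto
  -- step 1: rewrite the LHS sum as a sum over small, and split it
  have hsum1 : ∑ i ∈ Finset.Ico 2 (r + 1), (if i ∣ N then i + (if i * i = N then 0 else N / i) else 0)
      = (∑ i ∈ small, i) + ∑ i ∈ small2, N / i := by
    rw [← Finset.sum_filter, ← hsmall, Finset.sum_add_distrib]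
    congr 1
    rw [show (∑ i ∈ small, (if i * i = N then 0 else N / i))
        = ∑ i ∈ small, (if ¬ i * i = N then N / i else 0) from
      Finset.sum_congr rfl (fun i _ => by by_cases h : i * i = N <;> simp [h]),
      ← Finset.sum_filter, ← hsmall2]
  have hinj : Set.InjOn (fun i => N / i) ↑small2 := by
    intro i hi j hj hij
    obtain ⟨hi2, hir, hidvd, _⟩ := (hmem_small2 i).mp hi
    obtain ⟨hj2, hjr, hjdvd, _⟩ := (hmem_small2 j).mp hj
    have h1 : N / (N / i) = i := Nat.div_div_self hidvd hN0
    have h2' : N / (N / j) = j := Nat.div_div_self hjdvd hN0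
    simp only at hij
    rw [← h1, hij, h2']
  have himg_sum : ∑ d ∈ img, d = ∑ i ∈ small2, N / i := by
    rw [himg]; exact Finset.sum_image hinj
  -- basic facts about the cofactors
  have hq_ge : ∀ i ∈ small2, 2 ≤ N / i ∧ i ≤ N / i := by
    intro i hi
    obtain ⟨hi2, hir, hidvd, hine⟩ := (hmem_small2 i).mp hi
    have hqi : N / i * i = N := Nat.div_mul_cancel hidvd
    have hii : i * i ≤ N := Nat.le_sqrt.mp (hr ▸ hir)
    have hle : i ≤ N / i := by
      by_contra hc
      push Not at hc
      nlinarith [hqi, hii, hc, hi2]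
    refine ⟨?_, hle⟩
    by_contra hc
    push Not at hc
    rcases nat_lt_two_cases hc with h | h <;> rw [h] at hqi
    · rw [zero_mul] at hqi; omega
    · rw [one_mul] at hqi; omega
  -- step 2: the three pieces partition properDivisors N
  have hdisj1 : Disjoint ({1} : Finset ℕ) small := by
    rw [Finset.disjoint_left]; intro a ha hb
    obtain ⟨h2a, _, _⟩ := (hmem_small a).mp hb
    simp only [Finset.mem_singleton] at ha
    omega
  have hdisj2 : Disjoint (({1} : Finset ℕ) ∪ small) img := by
    rw [Finset.disjoint_left]; intro a ha hb
    rw [himg] at hb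
    obtain ⟨i, hi, hai⟩ := Finset.mem_image.mp hb
    obtain ⟨hi2, hir, hidvd, hine⟩ := (hmem_small2 i).mp hi
    have hqi : N / i * i = N := Nat.div_mul_cancel hidvd
    obtain ⟨h2q, _⟩ := hq_ge i hi
    rcases Finset.mem_union.mp ha with h1 | hs
    · -- a = 1, but N / i ≥ 2
      simp only [Finset.mem_singleton] at h1
      rw [h1] at hai
      rw [hai] at h2q
      exact absurd h2q (by norm_num)
    · obtain ⟨ha2, har, hadvd⟩ := (hmem_small a).mp hs
      -- a = N / i with a ≤ r and i ≤ r forces N = r * r and a = i = r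
      have hN : a * i = N := by rw [← hai]; exact hqi
      have h1' : N ≤ r * r := by
        calc N = a * i := hN.symm
        _ ≤ r * r := Nat.mul_le_mul har hir
      have hNrr : N = r * r := le_antisymm h1' hrr
      have hia : i = r := by
        by_contra hc
        have hilt : i < r := by omega
        nlinarith [hN, hNrr, har, hilt, (show 0 < r by omega), (show 0 ≤ i by omega)]
      exact hine (by rw [hia, ← hNrr])
  have hpart : (({1} : Finset ℕ) ∪ small) ∪ img = N.properDivisors := by
    ext d
    rw [Finset.mem_union, Finset.mem_union, Finset.mem_singleton, Nat.mem_properDivisors]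
    constructor
    · rintro ((hd1 | hds) | hdi)
      · subst hd1; exact ⟨one_dvd N, by omega⟩
      · obtain ⟨hd2, hdr, hddvd⟩ := (hmem_small d).mp hds
        exact ⟨hddvd, by omega⟩
      · rw [himg] at hdi
        obtain ⟨i, hi, hdi⟩ := Finset.mem_image.mp hdi
        obtain ⟨hi2, hir, hidvd, _⟩ := (hmem_small2 i).mp hi
        refine ⟨by rw [← hdi]; exact Nat.div_dvd_of_dvd hidvd, ?_⟩
        rw [← hdi]
        calc N / i ≤ N / 2 := Nat.div_le_div_left hi2 (by omega)
        _ < N := Nat.div_lt_self (by omega) (by omega)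
    · rintro ⟨hdvd, hlt⟩
      have hd1 : 1 ≤ d := Nat.pos_of_dvd_of_pos hdvd (by omega)
      rcases Nat.lt_or_ge r d with hbig | hle
      · -- d beyond the square root: d is the cofactor of N / d
        right
        have hqd : N / d * d = N := Nat.div_mul_cancel hdvd
        have hNdd : N < d * d := by
          have h := Nat.sqrt_lt'.mp (show N.sqrt < d by omega)
          rwa [pow_two] at h
        have hqled : N / d ≤ d := by
          by_contra hc
          push Not at hc
          nlinarith [hqd, hNdd, hc]
        have h2q : 2 ≤ N / d := by
          by_contra hc
          push Not at hc
          rcases nat_lt_two_cases hc with h | h <;> rw [h] at hqd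
          · rw [zero_mul] at hqd; omega
          · rw [one_mul] at hqd; omega
        have hqr : N / d ≤ r := by
          rw [hr]
          exact Nat.le_sqrt.mpr (by nlinarith [hqled, hqd])
        have hqq : N / d * (N / d) ≠ N := by
          intro hc
          have h0t : 0 < N / d := Nat.lt_of_lt_of_le (by norm_num) h2q
          have hq_eq : N / d = d := Nat.eq_of_mul_eq_mul_left h0t (by rw [hc]; exact hqd.symm)
          rw [hq_eq] at hqr
          omega
        rw [himg, Finset.mem_image]
        exact ⟨N / d, (hmem_small2 _).mpr ⟨h2q, hqr, Nat.div_dvd_of_dvd hdvd, hqq⟩,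
          Nat.div_div_self hdvd hN0⟩
      · rcases Nat.lt_or_ge d 2 with hsm | h2d
        · left; left; omega
        · left; right; exact (hmem_small d).mpr ⟨h2d, hle, hdvd⟩
  -- assemble
  rw [hsum1, ← himg_sum]
  simp only [spsum]
  rw [← hpart, Finset.sum_union hdisj2, Finset.sum_union hdisj1, Finset.sum_singleton]
  ring

-- ---- pure number theory: the below-half sum (B's sieve contribution) equals spsum ----
lemma nt_half (N L : Nat) (h1 : 1 ≤ N) (hL : N ≤ L) :
    (∑ d ∈ Finset.Ico 1 (L + 1), if d ∣ N ∧ 2 * d ≤ N then d else 0) = spsum N := by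
  classical
  rw [spsum, ← Finset.sum_filter]
  apply Finset.sum_congr _ (fun _ _ => rfl)
  ext d
  simp only [Finset.mem_filter, Finset.mem_Ico, Nat.mem_properDivisors, Nat.lt_succ_iff]
  constructor
  · rintro ⟨⟨hd1, hdL⟩, hdvd, hdn⟩
    exact ⟨hdvd, by omega⟩
  · rintro ⟨hdvd, hlt⟩
    have hd1 : 1 ≤ d := Nat.pos_of_dvd_of_pos hdvd (by omega)
    obtain ⟨k, hk⟩ := hdvd
    have hk2 : 2 ≤ k := by
      by_contra hc
      push Not at hc
      rcases nat_lt_two_cases hc with h | h <;> rw [h] at hk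
      · rw [Nat.mul_zero] at hk; omega
      · rw [Nat.mul_one] at hk; omega
    have h2d : 2 * d ≤ N := by
      have hmul : d * 2 ≤ d * k := Nat.mul_le_mul le_rfl hk2
      linarith [hk, hmul]
    exact ⟨⟨hd1, by omega⟩, ⟨k, hk⟩, h2d⟩

-- ---- A side: the trial-division loop ----
-- the loop body of calc_proper_factors, named for the proofs (let-free but definitionally equal)
def aStep (n : Int) (proper_factors : List Int) (item : Int) : List Int :=
  if PySem.Int.mod n item = 0 then
    if (PySem.Int.floordiv n item) ∈ proper_factors ++ [item] then proper_factors ++ [item]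
    else proper_factors ++ [item] ++ [PySem.Int.floordiv n item]
  else proper_factors

lemma calc_eq_aStep (x : Int) :
    calc_proper_factors x = (PySem.List.pyRange 2 (pyIntSqrtSucc x) 1).foldl (aStep x) [] ++ [1] := rfl

-- the per-item contribution once the membership test is resolved
def gA (n i : Int) : Int := if i ∣ n then i + (if i * i = n then 0 else n / i) else 0

lemma inv_widen {e b n : Int} (h2 : 2 ≤ e) (h : e < b ∨ n < e * b) :
    e < b + 1 ∨ n < e * (b + 1) := by
  rcases h with h | h
  · left; omega
  · right
    have hexp : e * (b + 1) = e * b + e := by ring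
    linarith

lemma aloop (n : Int) (h2 : 2 ≤ n) : ∀ k : Nat, (2 + (k : Int)) ≤ (Nat.sqrt n.toNat : Int) + 1 →
    (∀ e ∈ (PySem.List.pyRange 2 (2 + (k : Int)) 1).foldl (aStep n) [],
        e ∣ n ∧ 2 ≤ e ∧ (e < 2 + (k : Int) ∨ n < e * (2 + (k : Int)))) ∧
    ((PySem.List.pyRange 2 (2 + (k : Int)) 1).foldl (aStep n) []).sum
      = ((PySem.List.pyRange 2 (2 + (k : Int)) 1).map (gA n)).sum := by
  intro k
  induction k with
  | zero =>
    intro _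
    rw [show ((0 : Nat) : Int) = 0 by simp, add_zero, PySem.List.pyRange_one_eq_nil le_rfl]
    simp
  | succ k ih =>
    intro h
    have hcast : (2 + ((k + 1 : Nat) : Int)) = (2 + (k : Int)) + 1 := by push_cast; ring
    set b : Int := 2 + (k : Int) with hbdef
    have hb2 : (2 : Int) ≤ b := by omega
    have hb0 : (0 : Int) < b := by omega
    have hbR : b ≤ (Nat.sqrt n.toNat : Int) := by rw [hcast] at h; omega
    obtain ⟨hinv, hsum⟩ := ih (by omega)
    rw [hcast, PySem.List.pyRange_one_succ_right hb2, List.foldl_append, List.map_append,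
      List.sum_append]
    set pf : List Int := (PySem.List.pyRange 2 b 1).foldl (aStep n) [] with hpf
    have hbbn : b * b ≤ n := by
      have h1 : b.toNat ≤ Nat.sqrt n.toNat := by omega
      have h2' := Nat.le_sqrt.mp h1
      have hb' : ((b.toNat : Nat) : Int) = b := Int.toNat_of_nonneg (by omega)
      have hn' : ((n.toNat : Nat) : Int) = n := Int.toNat_of_nonneg (by omega)
      have h3 : ((b.toNat * b.toNat : Nat) : Int) ≤ ((n.toNat : Nat) : Int) := by exact_mod_cast h2'
      push_cast at h3
      rw [hb', hn'] at h3
      exact h3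
    simp only [List.foldl_cons, List.foldl_nil, List.map_cons, List.map_nil, List.sum_cons,
      List.sum_nil, add_zero]
    simp only [aStep, PySem.Int.mod_eq_zero_iff_dvd, PySem.Int.floordiv_eq_ediv_of_pos hb0]
    by_cases hdvd : b ∣ n
    · have hqb : n / b * b = n := Int.ediv_mul_cancel hdvd
      have hbq : b ≤ n / b := by
        apply le_of_mul_le_mul_right _ hb0
        rw [hqb]; exact hbbn
      have hqnotmem : n / b ∉ pf := by
        intro hmem
        obtain ⟨_, _, hc | hc⟩ := hinv _ hmem
        · omega
        · rw [hqb] at hc; omega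
      by_cases hqeqb : n / b = b
      · have hbbN : b * b = n := by nth_rewrite 1 [← hqeqb]; exact hqb
        have hmem : n / b ∈ pf ++ [b] := by simp [hqeqb]
        rw [if_pos hdvd, if_pos hmem]
        constructor
        · intro e he
          rcases List.mem_append.mp he with he | he
          · obtain ⟨h1', h2', h3'⟩ := hinv e he
            exact ⟨h1', h2', inv_widen h2' h3'⟩
          · simp only [List.mem_singleton] at he; subst he
            exact ⟨hdvd, hb2, Or.inl (by omega)⟩
        · rw [List.sum_append, List.sum_cons, List.sum_nil, add_zero, hsum]
          simp only [gA]
          rw [if_pos hdvd, if_pos hbbN, add_zero]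
      · have hbbN : ¬ b * b = n := by
          intro hc
          exact hqeqb (mul_right_cancel₀ (ne_of_gt hb0) (by rw [hqb]; exact hc.symm))
        have hmem : n / b ∉ pf ++ [b] := by
          simp only [List.mem_append, List.mem_singleton]
          rintro (hmem | hmem)
          · exact hqnotmem hmem
          · exact hqeqb hmem
        rw [if_pos hdvd, if_neg hmem]
        constructor
        · intro e he
          rcases List.mem_append.mp he with he | he
          · rcases List.mem_append.mp he with he | he
            · obtain ⟨h1', h2', h3'⟩ := hinv e he
              exact ⟨h1', h2', inv_widen h2' h3'⟩
            · simp only [List.mem_singleton] at he; subst he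
              exact ⟨hdvd, hb2, Or.inl (by omega)⟩
          · simp only [List.mem_singleton] at he; subst he
            refine ⟨⟨b, hqb.symm⟩, by omega, Or.inr ?_⟩
            have hexp : n / b * (b + 1) = n / b * b + n / b := by ring
            rw [hexp, hqb]
            omega
        · rw [List.sum_append, List.sum_append, List.sum_cons, List.sum_cons, List.sum_nil,
            add_zero, add_zero, hsum]
          simp only [gA]
          rw [if_pos hdvd, if_neg hbbN]
          ring
    · rw [if_neg hdvd]
      constructor
      · intro e he
        obtain ⟨h1', h2', h3'⟩ := hinv e he
        exact ⟨h1', h2', inv_widen h2' h3'⟩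
      · rw [hsum]
        simp only [gA]
        rw [if_neg hdvd, add_zero]

-- list-sum over a mapped List.range is a Finset.range sum
lemma sum_map_range (m : Nat) (f : Nat → Int) :
    ((List.range m).map f).sum = ∑ k ∈ Finset.range m, f k := by
  rw [← List.toFinset_range, List.sum_toFinset f List.nodup_range]

lemma calc_sum (n : Int) (h2 : 2 ≤ n) :
    (calc_proper_factors n).sum = ((spsum n.toNat : Nat) : Int) := by
  have hn0 : (0 : Int) ≤ n := by omega
  have hn' : ((n.toNat : Nat) : Int) = n := Int.toNat_of_nonneg hn0
  set r : Nat := Nat.sqrt n.toNat with hr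
  have hr1 : 1 ≤ r := by rw [hr]; exact Nat.le_sqrt.mpr (by omega)
  have hksum := (aloop n h2 (r - 1) (by omega)).2
  have hcast : (2 + ((r - 1 : Nat) : Int)) = (r : Int) + 1 := by omega
  rw [hcast] at hksum
  rw [calc_eq_aStep, List.sum_append, List.sum_cons, List.sum_nil, add_zero]
  have hsqrt : pyIntSqrtSucc n = (r : Int) + 1 := by rw [hr]; rfl
  rw [hsqrt, hksum]
  -- convert the Int map-sum over the range to the Nat Finset sum
  rw [PySem.List.pyRange_one, List.map_map]
  have hlen : ((r : Int) + 1 - 2).toNat = r - 1 := by omega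
  rw [hlen, sum_map_range]
  have hterm : ∀ k ∈ Finset.range (r - 1),
      (gA n ∘ fun j : Nat => (2 : Int) + (j : Int)) k
        = (((if (2 + k) ∣ n.toNat then (2 + k) + (if (2 + k) * (2 + k) = n.toNat then 0 else n.toNat / (2 + k)) else 0) : Nat) : Int) := by
    intro k _
    simp only [Function.comp_apply, gA]
    have hik : ((2 + k : Nat) : Int) = 2 + (k : Int) := by push_cast; ring
    have hdvd_iff : (2 + (k : Int)) ∣ n ↔ (2 + k) ∣ n.toNat := by
      have h := Int.natCast_dvd_natCast (m := 2 + k) (n := n.toNat)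
      rwa [hik, hn'] at h
    have hsq_iff : (2 + (k : Int)) * (2 + (k : Int)) = n ↔ (2 + k) * (2 + k) = n.toNat := by
      have h := Nat.cast_inj (R := Int) (m := (2 + k) * (2 + k)) (n := n.toNat)
      rwa [Nat.cast_mul, hik, hn'] at h
    by_cases hdvd : (2 + k) ∣ n.toNat
    · rw [if_pos (hdvd_iff.mpr hdvd), if_pos hdvd]
      have hdivcast : n / (2 + (k : Int)) = ((n.toNat / (2 + k) : Nat) : Int) := by
        have h1 := PySem.Int.floordiv_natCast n.toNat (2 + k)
        rw [PySem.Int.floordiv_eq_ediv_of_pos (by exact_mod_cast (by omega : 0 < 2 + k))] at h1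
        rw [hn', hik] at h1
        exact h1
      by_cases hsq : (2 + k) * (2 + k) = n.toNat
      · rw [if_pos (hsq_iff.mpr hsq), if_pos hsq]
        push_cast; ring
      · rw [if_neg (fun hc => hsq (hsq_iff.mp hc)), if_neg hsq, hdivcast]
        push_cast; ring
    · rw [if_neg (fun hc => hdvd (hdvd_iff.mp hc)), if_neg hdvd]
      simp
  rw [Finset.sum_congr rfl hterm, ← Nat.cast_sum]
  have hNat := nt_pairing n.toNat (by omega)
  rw [← hr] at hNat
  have hreindex : (∑ k ∈ Finset.range (r - 1),
      (if (2 + k) ∣ n.toNat then (2 + k) + (if (2 + k) * (2 + k) = n.toNat then 0 else n.toNat / (2 + k)) else 0))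
      = ∑ i ∈ Finset.Ico 2 (r + 1), (if i ∣ n.toNat then i + (if i * i = n.toNat then 0 else n.toNat / i) else 0) := by
    rw [Finset.sum_Ico_eq_sum_range, show r + 1 - 2 = r - 1 by omega]
  rw [hreindex]
  omega

-- ---- B side: the sieve ----
lemma sieveAdd_getD (s : Array Int) (m d q : Int) (hm : 0 ≤ m) (hmlen : m < (s.size : Int))
    (hq : 0 ≤ q) :
    (sieveAdd s m d).getD q.toNat 0
      = if q = m then s.getD q.toNat 0 + d else s.getD q.toNat 0 := by
  have hms : m.toNat < s.size := by omega
  rw [sieveAdd, Array.getD_eq_getD_getElem?, Array.getElem?_setIfInBounds]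
  by_cases hqm : q = m
  · subst hqm
    rw [if_pos rfl, if_pos hms, if_pos rfl]
    rfl
  · rw [if_neg (show ¬ m.toNat = q.toNat by omega), if_neg hqm, ← Array.getD_eq_getD_getElem?]

lemma foldl_sieveAdd_size (d : Int) (ms : List Int) (s : Array Int) :
    (ms.foldl (fun s m => sieveAdd s m d) s).size = s.size := by
  induction ms generalizing s with
  | nil => rfl
  | cons m ms ih =>
    rw [List.foldl_cons, ih]
    rw [sieveAdd]
    exact Array.size_setIfInBounds

lemma inner_getD (d : Int) (ms : List Int) :
    ∀ s : Array Int, ms.Nodup → (∀ m ∈ ms, 0 ≤ m ∧ m < (s.size : Int)) →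
    ∀ q : Int, 0 ≤ q →
    (ms.foldl (fun s m => sieveAdd s m d) s).getD q.toNat 0
      = s.getD q.toNat 0 + (if q ∈ ms then d else 0) := by
  induction ms with
  | nil => intro s _ _ q _; simp
  | cons m ms ih =>
    intro s hms hin q hq
    obtain ⟨hm0, hmlen⟩ := hin m (by simp)
    have hlen : (sieveAdd s m d).size = s.size := by
      rw [sieveAdd]; exact Array.size_setIfInBounds
    rw [List.foldl_cons, ih _ (List.Nodup.of_cons hms)
      (fun m' hm' => by rw [hlen]; exact hin m' (by simp [hm'])) q hq]
    rw [sieveAdd_getD s m d q hm0 hmlen hq]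
    by_cases hqm : q = m
    · subst hqm
      have hqnot : q ∉ ms := (List.nodup_cons.mp hms).1
      simp [hqnot]
    · simp [hqm]

lemma nodup_pyRange_pos (a b d : Int) (hd : 0 < d) : (PySem.List.pyRange a b d).Nodup := by
  rw [PySem.List.pyRange_of_pos _ _ hd]
  apply List.Nodup.map _ List.nodup_range
  intro x y hxy
  have h1 : d * (x : Int) = d * (y : Int) := by linarith [hxy]
  have h2 := mul_left_cancel₀ (ne_of_gt hd) h1
  exact_mod_cast h2

lemma outer_getD (limit : Int) (ds : List Int) :
    ∀ s : Array Int, (∀ d ∈ ds, 1 ≤ d) → (s.size : Int) = limit + 1 →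
    ∀ q : Int, 1 ≤ q → q ≤ limit →
    (ds.foldl (fun sums d =>
        (PySem.List.pyRange (2 * d) (limit + 1) d).foldl (fun sums m => sieveAdd sums m d) sums) s).getD q.toNat 0
      = s.getD q.toNat 0
        + (ds.map (fun d => if q ∈ PySem.List.pyRange (2 * d) (limit + 1) d then d else 0)).sum := by
  induction ds with
  | nil => intro s _ _ q _ _; simp
  | cons d ds ih =>
    intro s hds hlen q hq hql
    have hd1 : 1 ≤ d := hds d (by simp)
    have hd0 : 0 < d := by omega
    have hmem : ∀ m ∈ PySem.List.pyRange (2 * d) (limit + 1) d, 0 ≤ m ∧ m < (s.size : Int) := by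
      intro m hm
      obtain ⟨h1, h2, _⟩ := (PySem.List.mem_pyRange_iff_of_pos hd0 m).mp hm
      exact ⟨by omega, by omega⟩
    have hlen' : (((PySem.List.pyRange (2 * d) (limit + 1) d).foldl
        (fun sums m => sieveAdd sums m d) s).size : Int) = limit + 1 := by
      rw [foldl_sieveAdd_size]; exact hlen
    rw [List.foldl_cons, ih _ (fun d' hd' => hds d' (by simp [hd'])) hlen' q hq hql,
      inner_getD d _ s (nodup_pyRange_pos _ _ _ hd0) hmem q (by omega)]
    simp only [List.map_cons, List.sum_cons]
    ring

lemma sieve_getD (limit n : Int) (hl : 1 ≤ limit) (h1 : 1 ≤ n) (hn : n ≤ limit) :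
    ((PySem.List.pyRange 1 (limit + 1) 1).foldl (fun sums d =>
        (PySem.List.pyRange (2 * d) (limit + 1) d).foldl (fun sums m => sieveAdd sums m d) sums)
        (Array.replicate (limit + 1).toNat 0)).getD n.toNat 0
      = ((spsum n.toNat : Nat) : Int) := by
  have hlen : (((Array.replicate (limit + 1).toNat (0 : Int)).size : Nat) : Int) = limit + 1 := by
    rw [Array.size_replicate]
    omega
  have hds : ∀ d ∈ PySem.List.pyRange 1 (limit + 1) 1, (1 : Int) ≤ d := by
    intro d hd
    exact (PySem.List.mem_pyRange_one.mp hd).1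
  rw [outer_getD limit _ _ hds hlen n h1 hn]
  have hinit : (Array.replicate (limit + 1).toNat (0 : Int)).getD n.toNat 0 = 0 := by
    have hlt : n.toNat < (Array.replicate (limit + 1).toNat (0 : Int)).size := by
      rw [Array.size_replicate]; omega
    rw [Array.getD_eq_getD_getElem?, Array.getElem?_eq_getElem hlt, Array.getElem_replicate]
    rfl
  rw [hinit, zero_add]
  -- convert the list sum over pyRange 1 (limit+1) 1 into the Nat Finset sum
  rw [PySem.List.pyRange_one, List.map_map]
  have hlen1 : (limit + 1 - 1).toNat = limit.toNat := by omega
  rw [hlen1, sum_map_range]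
  have hterm : ∀ k ∈ Finset.range limit.toNat,
      ((fun d => if n ∈ PySem.List.pyRange (2 * d) (limit + 1) d then d else 0) ∘
        fun j : Nat => (1 : Int) + (j : Int)) k
        = (((if (1 + k) ∣ n.toNat ∧ 2 * (1 + k) ≤ n.toNat then (1 + k) else 0) : Nat) : Int) := by
    intro k _
    simp only [Function.comp_apply]
    have hd0 : (0 : Int) < 1 + (k : Int) := by omega
    have hdn : ((1 + k : Nat) : Int) = 1 + (k : Int) := by push_cast; ring
    have hn' : ((n.toNat : Nat) : Int) = n := Int.toNat_of_nonneg (by omega)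
    have hmem_iff : n ∈ PySem.List.pyRange (2 * (1 + (k : Int))) (limit + 1) (1 + (k : Int))
        ↔ ((1 + k) ∣ n.toNat ∧ 2 * (1 + k) ≤ n.toNat) := by
      rw [PySem.List.mem_pyRange_iff_of_pos hd0]
      constructor
      · rintro ⟨hge, _, hdvd⟩
        have hdvdn : (1 + (k : Int)) ∣ n := by
          have h := dvd_add hdvd (Dvd.dvd.mul_left (dvd_refl (1 + (k : Int))) 2)
          simpa using h
        constructor
        · rw [← Int.natCast_dvd_natCast, hdn, hn']; exact hdvdn
        · have h : ((2 * (1 + k) : Nat) : Int) ≤ ((n.toNat : Nat) : Int) := by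
            push_cast
            rw [hn']
            omega
          exact_mod_cast h
      · rintro ⟨hdvd, hge⟩
        have hdvdn : (1 + (k : Int)) ∣ n := by
          rw [← hn', ← hdn]
          exact_mod_cast hdvd
        refine ⟨?_, by omega, ?_⟩
        · have h : ((2 * (1 + k) : Nat) : Int) ≤ ((n.toNat : Nat) : Int) := by exact_mod_cast hge
          push_cast at h
          rw [hn'] at h
          omega
        · exact dvd_sub hdvdn (Dvd.dvd.mul_left (dvd_refl (1 + (k : Int))) 2)
    by_cases hc : (1 + k) ∣ n.toNat ∧ 2 * (1 + k) ≤ n.toNat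
    · rw [if_pos (hmem_iff.mpr hc), if_pos hc, hdn]
    · rw [if_neg (fun hx => hc (hmem_iff.mp hx)), if_neg hc]
      simp
  rw [Finset.sum_congr rfl hterm, ← Nat.cast_sum]
  have hreindex : (∑ k ∈ Finset.range limit.toNat,
      (if (1 + k) ∣ n.toNat ∧ 2 * (1 + k) ≤ n.toNat then (1 + k) else 0))
      = ∑ d ∈ Finset.Ico 1 (limit.toNat + 1), (if d ∣ n.toNat ∧ 2 * d ≤ n.toNat then d else 0) := by
    rw [Finset.sum_Ico_eq_sum_range, show limit.toNat + 1 - 1 = limit.toNat by omega]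
  rw [hreindex, nt_half n.toNat limit.toNat (by omega) (by omega)]

-- ===== VERDICT (by name: the statement is the Claim_ definition above) =====
theorem list_abundant_nums_spec : Claim_equal_list_abundant_nums := by
  intro limit _
  unfold Spec_list_abundant_nums
  by_cases hl : limit < 1
  · simp only [list_abundant_nums, list_abundant_nums_alt, if_pos hl,
      PySem.List.pyRange_one_eq_nil (show limit + 1 ≤ 1 by omega)]
    simp
  · push_neg at hl
    simp only [list_abundant_nums, list_abundant_nums_alt,
      if_neg (show ¬ limit < 1 by omega), List.map_map]
    rw [PySem.List.foldl_append_ite (fun item : Int × Int => item.1 < item.2)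
        (fun item : Int × Int => item.1),
      PySem.List.foldl_append_ite_eq_filter, List.nil_append, List.nil_append,
      List.filter_map, List.map_map]
    have hmapid : ∀ l : List Int,
        l.map ((fun item : Int × Int => item.1) ∘
          ((fun item : Int × Int => (item.1, (calc_proper_factors item.1).sum)) ∘
            (fun item : Int => (item, 0)))) = l := by
      intro l
      have hF : ((fun item : Int × Int => item.1) ∘
          ((fun item : Int × Int => (item.1, (calc_proper_factors item.1).sum)) ∘
            (fun item : Int => (item, 0)))) = (id : Int → Int) := rfl
      rw [hF, List.map_id]
    rw [hmapid]
    apply List.filter_congr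
    intro i hi
    obtain ⟨hi1, hi2⟩ := PySem.List.mem_pyRange_one.mp hi
    dsimp only [Function.comp]
    rw [decide_eq_decide]
    rw [sieve_getD limit i hl hi1 (by omega)]
    by_cases hione : i = 1
    · subst hione
      decide
    · rw [calc_sum i (by omega)]
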